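-- pv_equiv track=rewrite | github.com/tomorrowdevs-projects/challenges | challenges/intermediate/prime-reversion/solutions/aldotele/main.py | count_reversions
-- ===== SOURCE A (Python) =====
-- def find_primes_in_list(numbers):
--     """
--     :param numbers: list of integers
--     :return: a list of prime integers
--     """
--     primes = []
--     for num in numbers:
--         if num > 1:
--             for i in range(2,num):
--                 if (num % i) == 0:
--                     break
--             else:
--                 primes.append(num)
--     return primes
--
-- def count_reversions(couples):
--     """
--     :param couples: list of tuples with two integers each
--     :return: an integer
--     """
--     inner_sums = []
--     for couple in couples:
--         product = couple[0] * couple[1]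
--         product_as_str = str(product)
--         # using map to convert each element of the product to an integer
--         inner_sum = sum(list(map(int,product_as_str)))
--         inner_sums.append(inner_sum)
--     # after calculating the sums, I invoke the function to filter prime numbers
--     primes_among_sums = find_primes_in_list(inner_sums)
--     return len(primes_among_sums)
-- ===== SOURCE B (Python) =====
-- def _is_prime(n):
--     if n < 2:
--         return False
--     i = 2
--     while i * i <= n:
--         if n % i == 0:
--             return False
--         i += 1
--     return True
--
-- def count_reversions(couples):
--     count = 0
--     for a, b in couples:
--         digit_sum = sum(int(d) for d in str(a * b))
--         if _is_prime(digit_sum):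
--             count += 1
--     return count
-- ===== Notes on version B (the rewrite author's own statement) =====
-- stated objective: alternative
-- what changed: B is a single counting pass (no intermediate list of digit sums, no list of primes) and tests each digit sum for primality with trial division bounded by i*i <= n instead of A's trial division over the whole range(2, n).
import Mathlib
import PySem

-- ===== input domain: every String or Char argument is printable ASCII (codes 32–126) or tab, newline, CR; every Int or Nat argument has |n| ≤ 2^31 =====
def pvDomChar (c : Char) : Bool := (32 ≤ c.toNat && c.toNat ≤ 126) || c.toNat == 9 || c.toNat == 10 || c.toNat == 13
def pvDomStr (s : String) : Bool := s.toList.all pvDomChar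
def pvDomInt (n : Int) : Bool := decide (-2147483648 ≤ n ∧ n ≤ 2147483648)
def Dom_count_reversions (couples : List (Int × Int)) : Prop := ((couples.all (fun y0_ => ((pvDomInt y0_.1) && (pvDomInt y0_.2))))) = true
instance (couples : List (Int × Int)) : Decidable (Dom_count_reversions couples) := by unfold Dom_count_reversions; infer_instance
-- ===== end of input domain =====

-- B replaces A's two-phase list pipeline (collect digit sums, filter primes by full-range trial
-- division, take the length) by a single counting pass with trial division bounded by i*i ≤ n.


-- shared by both ports (both Pythons compute sum(int(d) for d in str(product))).
-- getD 0: int(d) raises ValueError exactly when d is not a digit (the '-' of a negative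
-- product); those inputs are excluded by Pre_count_reversions.
def pvDigitSum (product : Int) : Int :=
  (((PySem.Int.toStr product).toList.map
      (fun ch => (PySem.Int.ofStr? (String.ofList [ch])).getD 0))).sum

-- ===== PORT A =====
def find_primes_in_list (numbers : List Int) : List Int :=
  numbers.foldl
    (fun primes num =>
      if num > 1 then
        -- for i in range(2, num): if num % i == 0: break / else: append
        if (PySem.List.pyRange 2 num 1).all (fun i => PySem.Int.mod num i != 0) then
          primes ++ [num]
        else primes
      else primes) []

def count_reversions (couples : List (Int × Int)) : Int :=
  let inner_sums := couples.foldl (fun acc couple => acc ++ [pvDigitSum (couple.1 * couple.2)]) []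
  let primes_among_sums := find_primes_in_list inner_sums
  (primes_among_sums.length : Int)

-- ===== PORT B =====
-- while i * i <= n: … i += 1   — fuel n.toNat bounds the iteration count (i starts at 2 and
-- the loop runs only while i*i ≤ n, hence fewer than n steps).
def pvTrial (n : Int) : Nat → Int → Bool
  | 0, _ => true
  | fuel + 1, i =>
    if i * i ≤ n then
      if PySem.Int.mod n i == 0 then false else pvTrial n fuel (i + 1)
    else true

def pvIsPrime (n : Int) : Bool :=
  if n < 2 then false else pvTrial n n.toNat 2

def count_reversions_alt (couples : List (Int × Int)) : Int :=
  couples.foldl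
    (fun count couple =>
      if pvIsPrime (pvDigitSum (couple.1 * couple.2)) then count + 1 else count) 0

-- ===== PRECONDITION & SPEC =====
-- Pre_ excludes couples with a negative product: there str(product) starts with '-' and
-- Python's int('-') raises ValueError in both A and B.
def Pre_count_reversions (couples : List (Int × Int)) : Prop :=
  ∀ c ∈ couples, 0 ≤ c.1 * c.2
instance (couples : List (Int × Int)) : Decidable (Pre_count_reversions couples) := by
  unfold Pre_count_reversions; infer_instance

def pvWitness_count_reversions : (List (Int × Int)) := [(2, 5), (3, 4), (0, 0), (7, 8)]

def Spec_count_reversions (couples : List (Int × Int)) (out : Int) : Prop := out = count_reversions_alt couples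
instance (couples : List (Int × Int)) (out : Int) : Decidable (Spec_count_reversions couples out) := by unfold Spec_count_reversions; infer_instance

-- ===== CLAIM (what is proved, stated in full; the proofs are below) =====
def Claim_equal_count_reversions : Prop := ∀ (couples : List (Int × Int)), Dom_count_reversions couples → Pre_count_reversions couples → Spec_count_reversions couples (count_reversions couples)

-- ===== LEMMAS AND PROOFS =====

-- A's per-element primality test, as a predicate.
def pvTestA (n : Int) : Bool :=
  n > 1 && (PySem.List.pyRange 2 n 1).all (fun i => PySem.Int.mod n i != 0)

lemma find_primes_eq_filter (numbers : List Int) :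
    find_primes_in_list numbers = numbers.filter pvTestA := by
  unfold find_primes_in_list
  have h : ∀ (acc : List Int),
      numbers.foldl
        (fun primes num =>
          if num > 1 then
            if (PySem.List.pyRange 2 num 1).all (fun i => PySem.Int.mod num i != 0) then
              primes ++ [num]
            else primes
          else primes) acc = acc ++ numbers.filter pvTestA := by
    induction numbers with
    | nil => simp
    | cons x xs ih =>
      intro acc
      rw [List.foldl_cons, List.filter_cons]
      by_cases hx : x > 1
      · by_cases hall : ((PySem.List.pyRange 2 x 1).all (fun i => PySem.Int.mod x i != 0)) = true
        · have ht : pvTestA x = true := by unfold pvTestA; rw [hall]; simp [hx]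
          rw [if_pos hx, if_pos hall, ih, ht]
          simp
        · have ht : pvTestA x = false := by unfold pvTestA; simp [hall]
          rw [if_pos hx, if_neg hall, ih, ht]
          simp
      · have ht : pvTestA x = false := by unfold pvTestA; simp [hx]
        rw [if_neg hx, ih, ht]
        simp
  simpa using h []

lemma pvTrial_spec (n : Int) :
    ∀ (fuel : Nat) (i : Int), 2 ≤ i → n < i + fuel →
      (pvTrial n fuel i = true ↔ ∀ j : Int, i ≤ j → j * j ≤ n → ¬ (j ∣ n)) := by
  intro fuel
  induction fuel with
  | zero =>
    intro i h2 hf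
    push_cast at hf
    simp only [pvTrial, true_iff]
    intro j hij hjj hdvd
    have h2j : 2 ≤ j := le_trans h2 hij
    nlinarith
  | succ fuel ih =>
    intro i h2 hf
    push_cast at hf
    simp only [pvTrial]
    by_cases hle : i * i ≤ n
    · rw [if_pos hle]
      by_cases hmod : PySem.Int.mod n i = 0
      · have hc : (PySem.Int.mod n i == 0) = true := by simp [hmod]
        rw [hc]
        simp only [if_true, Bool.false_eq_true, false_iff, not_forall]
        exact ⟨i, le_rfl, hle, fun hn => hn ((PySem.Int.mod_eq_zero_iff_dvd n i).mp hmod)⟩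
      · have hc : (PySem.Int.mod n i == 0) = false := by simp [hmod]
        rw [hc]
        simp only [Bool.false_eq_true, if_false]
        rw [ih (i + 1) (by omega) (by omega)]
        constructor
        · intro h j hij hjj
          rcases eq_or_lt_of_le hij with rfl | hlt
          · intro hdvd
            exact hmod ((PySem.Int.mod_eq_zero_iff_dvd n _).mpr hdvd)
          · exact h j (by omega) hjj
        · intro h j hij hjj
          exact h j (by omega) hjj
    · rw [if_neg hle]
      have hlt : n < i * i := lt_of_not_ge hle
      constructor
      · intro _ j hij hjj hdvd
        have : i * i ≤ j * j := by nlinarith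
        omega
      · intro _
        rfl

-- the √n bound and the full-range bound agree
lemma test_eq (n : Int) : pvTestA n = pvIsPrime n := by
  by_cases h1 : n > 1
  · have hA : pvTestA n = true ↔ ∀ j : Int, 2 ≤ j → j < n → ¬ (j ∣ n) := by
      unfold pvTestA
      simp only [Bool.and_eq_true, List.all_eq_true, decide_eq_true_eq, bne_iff_ne, ne_eq]
      constructor
      · intro ⟨_, hall⟩ j hj2 hjn hdvd
        exact hall j ((PySem.List.mem_pyRange_one).mpr ⟨hj2, hjn⟩)
          ((PySem.Int.mod_eq_zero_iff_dvd n j).mpr hdvd)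
      · intro h
        refine ⟨h1, fun j hj hmod => ?_⟩
        obtain ⟨hj2, hjn⟩ := (PySem.List.mem_pyRange_one).mp hj
        exact h j hj2 hjn ((PySem.Int.mod_eq_zero_iff_dvd n j).mp hmod)
    have hB : pvIsPrime n = true ↔ ∀ j : Int, 2 ≤ j → j * j ≤ n → ¬ (j ∣ n) := by
      unfold pvIsPrime
      rw [if_neg (by omega), pvTrial_spec n n.toNat 2 le_rfl (by omega)]
    have hiff : (∀ j : Int, 2 ≤ j → j < n → ¬ (j ∣ n)) ↔
        (∀ j : Int, 2 ≤ j → j * j ≤ n → ¬ (j ∣ n)) := by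
      constructor
      · intro h j hj2 hjj
        exact h j hj2 (by nlinarith)
      · intro h j hj2 hjn hdvd
        obtain ⟨k, hk⟩ := hdvd
        have hj0 : 0 < j := by omega
        have hk2 : 2 ≤ k := by nlinarith
        by_cases hjj : j * j ≤ n
        · exact h j hj2 hjj ⟨k, hk⟩
        · have hkk : k * k ≤ n := by nlinarith
          exact h k hk2 hkk ⟨j, by linarith [mul_comm j k]⟩
    have hiff2 : pvTestA n = true ↔ pvIsPrime n = true := hA.trans (hiff.trans hB.symm)
    cases hb : pvIsPrime n with
    | true => exact hiff2.mpr hb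
    | false =>
      cases ha : pvTestA n with
      | true => rw [hb] at hiff2; exact absurd (hiff2.mp ha) (by simp)
      | false => rfl
  · unfold pvTestA pvIsPrime
    rw [if_pos (by omega)]
    simp [h1]

-- ===== VERDICT (by name: the statement is the Claim_ definition above) =====
theorem count_reversions_spec : Claim_equal_count_reversions := by
  intro couples _ _
  unfold Spec_count_reversions
  simp only [count_reversions, count_reversions_alt]
  rw [PySem.List.foldl_if_add_one, find_primes_eq_filter,
      PySem.List.foldl_append_singleton_eq_map]
  simp only [List.nil_append, ← List.countP_eq_length_filter, List.countP_map, zero_add]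
  congr 1
  apply List.countP_congr
  intro c _
  simp [Function.comp, test_eq]
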